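-- pv_equiv track=rewrite | github.com/BergiBerghold/bergipy | src/bergipy/ListTools.py | hilbertizer
-- ===== SOURCE A (Python) =====
-- def hilbertizer(input_list):
--     output_list = []
--     none_appended = False
--
--     input_list = list(input_list)
--
--     if len(input_list) % 2 == 1:
--         input_list.append(None)
--         none_appended = True
--
--     while len(input_list) > 0:
--         len_input_list = len(input_list)
--
--         first_half = input_list[:len_input_list // 2]
--         second_half = input_list[len_input_list // 2:]
--
--         if len(first_half) % 2 == 0:
--             output_list.append(first_half.pop(0))
--             output_list.append(second_half.pop(0))
--
--         if len(first_half) % 2 == 1: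
--             output_list.append(first_half.pop(len(first_half) // 2))
--             output_list.append(second_half.pop(len(first_half) // 2))
--
--         input_list = first_half + second_half
--
--     if none_appended: output_list.pop(-1)
--
--     return output_list
-- ===== SOURCE B (Python) =====
-- def _half_perm(m):
--     # the fixed permutation of 0..m-1 that hilbertizer applies to each half
--     if m % 2 == 0:
--         return [x for i in range(m // 2) for x in (i, i + m // 2)]
--     return [m // 2] + [x for i in range(m // 2) for x in (i, i + m // 2 + 1)]
--
-- def hilbertizer(input_list):
--     # Closed form: the output is input_list reordered by a fixed index sequence:
--     # for m = ceil(n/2), interleave _half_perm(m) with _half_perm(m)+m and drop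
--     # indices >= n (only the padding slot of an odd-length list).
--     lst = list(input_list)
--     n = len(lst)
--     m = (n + 1) // 2
--     if m == 0:
--         return []
--     s = _half_perm(m)
--     idx = [x for i in s for x in (i, i + m)]
--     return [lst[i] for i in idx if i < n]
-- ===== Notes on version B (the rewrite author's own statement) =====
-- stated objective: faster
-- what changed: A's while-loop of repeated list slicing and positional pops is replaced by a closed-form fixed index permutation (interleaving a half-permutation s with s+m) computed directly and applied in one pass.
import Mathlib
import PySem

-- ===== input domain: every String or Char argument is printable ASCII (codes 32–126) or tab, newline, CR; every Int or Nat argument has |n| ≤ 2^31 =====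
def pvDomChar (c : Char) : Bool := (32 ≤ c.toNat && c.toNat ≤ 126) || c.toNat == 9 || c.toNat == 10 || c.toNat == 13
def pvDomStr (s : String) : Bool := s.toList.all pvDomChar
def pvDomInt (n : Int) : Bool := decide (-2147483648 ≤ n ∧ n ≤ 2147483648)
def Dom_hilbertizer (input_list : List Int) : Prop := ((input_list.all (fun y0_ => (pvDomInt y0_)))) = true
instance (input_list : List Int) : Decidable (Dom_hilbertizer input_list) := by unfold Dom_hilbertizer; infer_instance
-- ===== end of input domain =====

-- B replaces A's loop of positional pops by a closed-form index permutation (measured faster); A = B is proved on all inputs.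
-- ===== PORT A =====

-- list.pop(i): the removed element is read with getD, the rest is take i ++ drop (i+1)
-- (Python raises for an out-of-range i; on every state A reaches the index is in range)
def popList {α : Type} (xs : List α) (i : Nat) : List α := xs.take i ++ xs.drop (i + 1)

-- the while-loop of A, over Option Int ('none' = Python's None sentinel); returns output_list.
-- Structural recursion on a fuel counter (one unit per iteration; each iteration shortens the
-- list, so fuel = initial length always suffices): a totality guard only, not a size bound.
def hilLoopF : Nat → List (Option Int) → List (Option Int)
  | 0, _ => []
  | fuel + 1, cur =>
    if cur.length = 0 then []
    else
      let fh := cur.take (cur.length / 2)        -- input_list[:len//2]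
      let sh := cur.drop (cur.length / 2)        -- input_list[len//2:]
      if fh.length % 2 = 0 then
        let a := fh.getD 0 none                  -- first_half.pop(0)
        let fh1 := popList fh 0
        let b := sh.getD 0 none                  -- second_half.pop(0)
        let sh1 := popList sh 0
        if fh1.length % 2 = 1 then               -- if len(first_half) % 2 == 1
          let c := fh1.getD (fh1.length / 2) none      -- first_half.pop(len(first_half)//2)
          let fh2 := popList fh1 (fh1.length / 2)
          let d := sh1.getD (fh2.length / 2) none      -- second_half.pop(len(first_half)//2)
          let sh2 := popList sh1 (fh2.length / 2)
          a :: b :: c :: d :: hilLoopF fuel (fh2 ++ sh2)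
        else
          a :: b :: hilLoopF fuel (fh1 ++ sh1)
      else
        let c := fh.getD (fh.length / 2) none
        let fh2 := popList fh (fh.length / 2)
        let d := sh.getD (fh2.length / 2) none
        let sh2 := popList sh (fh2.length / 2)
        c :: d :: hilLoopF fuel (fh2 ++ sh2)

def hilLoop (cur : List (Option Int)) : List (Option Int) := hilLoopF cur.length cur

def hilbertizer (input_list : List Int) : List Int :=
  let lst := input_list.map (fun x => some x)
  if lst.length % 2 = 1 then
    -- input_list.append(None); … ; output_list.pop(-1): the popped element is the sentinel
    ((hilLoop (lst ++ [none])).dropLast).filterMap id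
  else
    (hilLoop lst).filterMap id

-- ===== PORT B =====

-- _half_perm(m) of Source B
def sIdx (m : Nat) : List Nat :=
  if m % 2 = 0 then (List.range (m / 2)).flatMap (fun i => [i, i + m / 2])
  else m / 2 :: (List.range (m / 2)).flatMap (fun i => [i, i + m / 2 + 1])

def hilbertizer_alt (input_list : List Int) : List Int :=
  let n := input_list.length
  let m := (n + 1) / 2
  if m = 0 then []
  else
    let idx := (sIdx m).flatMap (fun i => [i, i + m])
    (idx.filter (fun i => i < n)).map (fun i => input_list.getD i 0)

-- ===== PRECONDITION & SPEC =====
def Spec_hilbertizer (input_list : List Int) (out : List Int) : Prop := out = hilbertizer_alt input_list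
instance (input_list : List Int) (out : List Int) : Decidable (Spec_hilbertizer input_list out) := by unfold Spec_hilbertizer; infer_instance

-- ===== CLAIM (what is proved, stated in full; the proofs are below) =====
def Claim_equal_hilbertizer : Prop := ∀ (input_list : List Int), Dom_hilbertizer input_list → Spec_hilbertizer input_list (hilbertizer input_list)

-- ===== LEMMAS AND PROOFS =====

theorem flatMap_congr_mem {α β : Type} {l : List α} {f g : α → List β}
    (h : ∀ a ∈ l, f a = g a) : l.flatMap f = l.flatMap g := by
  induction l with
  | nil => rfl
  | cons a t ih =>
      simp only [List.flatMap_cons, h a (by simp), ih (fun b hb => h b (by simp [hb]))]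

theorem popList_getElem? {α : Type} (xs : List α) (k j : Nat) (hk : k < xs.length) :
    (popList xs k)[j]? = if j < k then xs[j]? else xs[j + 1]? := by
  unfold popList
  rcases Nat.lt_or_ge j k with hj | hj
  · rw [if_pos hj, List.getElem?_append_left (by simp [List.length_take]; omega)]
    simp [hj]
  · rw [if_neg (by omega), List.getElem?_append_right (by simp [List.length_take]; omega),
      List.getElem?_drop]
    congr 1
    simp [List.length_take]
    omega

theorem popList_getD {α : Type} (xs : List α) (k j : Nat) (d : α) (hk : k < xs.length) :
    (popList xs k).getD j d = if j < k then xs.getD j d else xs.getD (j + 1) d := by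
  simp only [List.getD_eq_getElem?_getD, popList_getElem? xs k j hk]
  split <;> rfl

theorem popList_length {α : Type} (xs : List α) (k : Nat) (hk : k < xs.length) :
    (popList xs k).length = xs.length - 1 := by
  simp [popList, List.length_take, List.length_drop]
  omega

theorem s_lt {m i : Nat} (h : i ∈ sIdx m) : i < m := by
  unfold sIdx at h
  split at h <;> simp [List.mem_flatMap] at h <;> omega

theorem s_even (j : Nat) : sIdx (2 * (j + 1)) = 0 :: (sIdx (2 * (j + 1) - 1)).map (· + 1) := by
  unfold sIdx
  rw [if_pos (by omega), if_neg (by omega),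
    show 2 * (j + 1) / 2 = j + 1 from by omega,
    show (2 * (j + 1) - 1) / 2 = j from by omega,
    List.range_succ_eq_map]
  simp only [List.flatMap_cons, List.flatMap_map, List.map_cons, List.map_flatMap]
  simp only [Nat.succ_eq_add_one]
  rw [flatMap_congr_mem (g := fun i => [i + 1, i + j + 1 + 1]) (by intro a _; simp; omega)]
  simp

theorem s_odd (k : Nat) :
    sIdx (2 * k + 1) = k :: (sIdx (2 * k)).map (fun j => if j < k then j else j + 1) := by
  unfold sIdx
  rw [if_neg (by omega), if_pos (by omega),
    show (2 * k + 1) / 2 = k from by omega,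
    show 2 * k / 2 = k from by omega]
  congr 1
  rw [List.map_flatMap]
  apply flatMap_congr_mem
  intro a ha
  simp only [List.mem_range] at ha
  simp only [List.map_cons, List.map_nil]
  rw [if_pos ha, if_neg (by omega)]

-- the per-half action of A's loop: pop the head on even length, pop the middle on odd length
def gg (d : Option Int) : List (Option Int) → List (Option Int)
  | [] => []
  | x :: rest =>
      if (x :: rest).length % 2 = 0 then x :: gg d rest
      else (x :: rest).getD ((x :: rest).length / 2) d ::
        gg d (popList (x :: rest) ((x :: rest).length / 2))
termination_by xs => xs.length
decreasing_by
  · simp only [List.length_cons]; omega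
  · simp only [popList, List.length_append, List.length_take, List.length_drop,
      List.length_cons]; omega

theorem gg_nil (d : Option Int) : gg d [] = [] := by rw [gg]

theorem gg_even (d : Option Int) (xs : List (Option Int)) (h : xs.length % 2 = 0)
    (h0 : xs ≠ []) : gg d xs = xs.getD 0 d :: gg d (popList xs 0) := by
  obtain ⟨x, rest, rfl⟩ := List.exists_cons_of_ne_nil h0
  rw [gg, if_pos h]
  simp [popList]

theorem gg_odd (d : Option Int) (xs : List (Option Int)) (h : xs.length % 2 = 1) :
    gg d xs = xs.getD (xs.length / 2) d :: gg d (popList xs (xs.length / 2)) := by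
  obtain ⟨x, rest, rfl⟩ := List.exists_cons_of_ne_nil
    (l := xs) (fun hh => by subst hh; simp at h)
  rw [gg, if_neg (by omega)]

theorem gg_closed (d : Option Int) (n : Nat) (xs : List (Option Int)) (hn : xs.length = n) :
    gg d xs = (sIdx n).map (fun i => xs.getD i d) := by
  induction n using Nat.strong_induction_on generalizing xs with
  | _ n IH =>
    rcases Nat.even_or_odd n with ⟨k, hk⟩ | ⟨k, hk⟩
    · rcases k with _ | j
      · have h0 : n = 0 := by omega
        subst h0
        have : xs = [] := List.eq_nil_of_length_eq_zero hn
        subst this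
        simp [gg, sIdx]
      · obtain ⟨x, rest, rfl⟩ := List.exists_cons_of_ne_nil
          (l := xs) (fun h => by subst h; simp at hn; omega)
        rw [gg, if_pos (by rw [hn]; omega)]
        have hr : rest.length = n - 1 := by simp at hn; omega
        rw [IH (n - 1) (by omega) rest hr,
          show n = 2 * (j + 1) from by omega, s_even j]
        simp only [List.map_cons, List.map_map]
        rfl
    · obtain ⟨x, rest, rfl⟩ := List.exists_cons_of_ne_nil
        (l := xs) (fun h => by subst h; simp at hn; omega)
      rw [gg, if_neg (by rw [hn]; omega)]
      have hlt : n / 2 < (x :: rest).length := by omega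
      have hpl : (popList (x :: rest) (n / 2)).length = n - 1 := by
        rw [popList_length _ (n / 2) hlt]; omega
      rw [hn]
      rw [IH (n - 1) (by omega) _ hpl,
        show n = 2 * k + 1 from by omega, s_odd k,
        show (2 * k + 1) / 2 = k from by omega]
      simp only [List.map_cons, List.map_map]
      congr 1
      apply List.map_congr_left
      intro i _
      simp only [Function.comp]
      rw [popList_getD _ k i d (by omega)]
      split <;> rfl

-- interleave two lists, first list first (Python's alternating emission order)
def ilv {α : Type} : List α → List α → List α
  | [], b => b
  | a :: as, b => a :: ilv b as
termination_by a b => a.length + b.length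
decreasing_by simp only [List.length_cons]; omega

theorem ilv_nil {α : Type} (b : List α) : ilv [] b = b := by rw [ilv]
theorem ilv_cons {α : Type} (a : α) (as b : List α) : ilv (a :: as) b = a :: ilv b as := by rw [ilv]

theorem ilv_cons_cons {α : Type} (a b : α) (as bs : List α) :
    ilv (a :: as) (b :: bs) = a :: b :: ilv as bs := by rw [ilv_cons, ilv_cons]

theorem ilv_flatMap {α β : Type} (p q : α → β) (u : List α) :
    ilv (u.map p) (u.map q) = u.flatMap (fun i => [p i, q i]) := by
  induction u with
  | nil => simp [ilv_nil]
  | cons a t ih => simp only [List.map_cons, ilv_cons_cons, List.flatMap_cons, ih]; rfl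

theorem ilv_map {α β : Type} (f : α → β) (a b : List α) :
    ilv (a.map f) (b.map f) = (ilv a b).map f := by
  induction a, b using ilv.induct with
  | case1 b => simp [ilv_nil]
  | case2 x as b ih => simp only [List.map_cons, ilv_cons, ih]

theorem ilv_append_pair {α : Type} (a b : List α) (x y : α) (h : a.length = b.length) :
    ilv (a ++ [x]) (b ++ [y]) = ilv a b ++ [x, y] := by
  induction a generalizing b with
  | nil =>
    have : b = [] := by cases b <;> simp_all
    subst this
    simp [ilv_nil, ilv_cons]
  | cons a0 as ih =>
    obtain ⟨b0, bs, rfl⟩ : ∃ b0 bs, b = b0 :: bs := by cases b <;> simp_all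
    simp only [List.cons_append, ilv_cons_cons]
    rw [ih bs (by simp_all)]

theorem loopF_ilv (m : Nat) (fuel : Nat) (L : List (Option Int)) (h : L.length = 2 * m)
    (hf : m ≤ fuel) :
    hilLoopF fuel L = ilv (gg none (L.take m)) (gg none (L.drop m)) := by
  induction m using Nat.strong_induction_on generalizing L fuel with
  | _ m IH =>
    rcases Nat.eq_zero_or_pos m with rfl | hm
    · have : L = [] := List.eq_nil_of_length_eq_zero (by omega)
      subst this
      rw [List.take_nil, List.drop_nil, gg_nil, ilv_nil]
      cases fuel <;> rfl
    · obtain ⟨f, rfl⟩ : ∃ f, fuel = f + 1 := ⟨fuel - 1, by omega⟩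
      have hF : (L.take (m)).length = m := by simp [List.length_take]; omega
      have hS : (L.drop (m)).length = m := by simp [List.length_drop]; omega
      rw [hilLoopF]
      rw [if_neg (by omega), show L.length / 2 = m from by omega]
      rcases Nat.even_or_odd m with ⟨k, hk⟩ | ⟨k, hk⟩
      · -- m even, m = 2k ≥ 2
        rw [if_pos (by omega)]
        dsimp only
        have h1l : (popList (L.take m) 0).length = m - 1 := by
          rw [popList_length _ 0 (by omega)]; omega
        rw [h1l, if_pos (by omega)]
        have h2l : (popList (popList (L.take m) 0) ((m - 1) / 2)).length = m - 2 := by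
          rw [popList_length _ _ (by rw [h1l]; omega), h1l]; omega
        rw [h2l]
        have h2s : (popList (L.drop m) 0).length = m - 1 := by
          rw [popList_length _ 0 (by omega)]; omega
        have h3s : (popList (popList (L.drop m) 0) ((m - 2) / 2)).length = m - 2 := by
          rw [popList_length _ _ (by rw [h2s]; omega), h2s]; omega
        rw [IH (m - 2) (by omega) f _ (by simp only [List.length_append, h2l, h3s]; omega)
          (by omega)]
        rw [List.take_left' h2l, List.drop_left' h2l]
        rw [gg_even none (L.take m) (by omega)
              (by intro hh; rw [hh] at hF; simp at hF; omega),
            gg_even none (L.drop m) (by omega)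
              (by intro hh; rw [hh] at hS; simp at hS; omega),
            gg_odd none (popList (L.take m) 0) (by rw [h1l]; omega),
            gg_odd none (popList (L.drop m) 0) (by rw [h2s]; omega)]
        rw [ilv_cons_cons, ilv_cons_cons, h1l, h2s]
        rw [show (m - 2) / 2 = (m - 1) / 2 from by omega]
      · -- m odd, m = 2k+1
        rw [if_neg (by omega)]
        dsimp only
        rw [hF]
        have h1l : (popList (L.take m) (m / 2)).length = m - 1 := by
          rw [popList_length _ _ (by omega)]; omega
        rw [h1l]
        have h1s : (popList (L.drop m) ((m - 1) / 2)).length = m - 1 := by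
          rw [popList_length _ _ (by omega)]; omega
        rw [IH (m - 1) (by omega) f _ (by simp only [List.length_append, h1l, h1s]; omega)
          (by omega)]
        rw [List.take_left' h1l, List.drop_left' h1l]
        rw [gg_odd none (L.take m) (by omega), gg_odd none (L.drop m) (by omega)]
        rw [ilv_cons_cons, hF, hS]
        rw [show (m - 1) / 2 = m / 2 from by omega]

theorem loop_ilv (m : Nat) (L : List (Option Int)) (h : L.length = 2 * m) :
    hilLoop L = ilv (gg none (L.take m)) (gg none (L.drop m)) := by
  unfold hilLoop
  exact loopF_ilv m L.length L h (by omega)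

-- sIdx m split as its proper prefix plus its last element m-1
def tIdx (m : Nat) : List Nat :=
  if m % 2 = 0 then (List.range (m / 2 - 1)).flatMap (fun i => [i, i + m / 2]) ++ [m / 2 - 1]
  else if m = 1 then []
  else m / 2 :: ((List.range (m / 2 - 1)).flatMap (fun i => [i, i + m / 2 + 1]) ++ [m / 2 - 1])

theorem s_split (m : Nat) (hm : 1 ≤ m) : sIdx m = tIdx m ++ [m - 1] := by
  rcases Nat.even_or_odd m with ⟨k, hk⟩ | ⟨k, hk⟩
  · obtain ⟨j, rfl⟩ : ∃ j, k = j + 1 := ⟨k - 1, by omega⟩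
    unfold sIdx tIdx
    rw [if_pos (by omega), if_pos (by omega),
      show m / 2 = j + 1 from by omega, show j + 1 - 1 = j from by omega,
      List.range_succ, List.flatMap_append]
    simp only [List.flatMap_cons, List.flatMap_nil, List.append_assoc, List.append_nil,
      List.cons_append, List.nil_append]
    have e : j + (j + 1) = m - 1 := by omega
    simp [e]
  · rcases Nat.eq_or_lt_of_le hm with he | hl
    · simp [← he, sIdx, tIdx]
    · obtain ⟨j, rfl⟩ : ∃ j, k = j + 1 := ⟨k - 1, by omega⟩
      unfold sIdx tIdx
      rw [if_neg (by omega), if_neg (by omega), if_neg (by omega),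
        show m / 2 = j + 1 from by omega, show j + 1 - 1 = j from by omega,
        List.range_succ, List.flatMap_append]
      simp only [List.flatMap_cons, List.flatMap_nil, List.append_assoc, List.append_nil,
        List.cons_append, List.nil_append]
      have e : j + (j + 1) + 1 = m - 1 := by omega
      simp [e]

theorem t_lt {m i : Nat} (hm : 1 ≤ m) (h : i ∈ tIdx m) : i < m - 1 := by
  unfold tIdx at h
  split at h
  · simp [List.mem_flatMap] at h
    rcases h with h | h <;> omega
  · split at h
    · simp at h
    · simp [List.mem_flatMap] at h
      rcases h with h | h | h <;> omega

-- getD helpers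
theorem getD_drop (l : List Int) (n m : Nat) (d : Int) : (l.drop n).getD m d = l.getD (n + m) d := by
  simp [List.getD_eq_getElem?_getD, List.getElem?_drop]

theorem getD_take (l : List Int) (n m : Nat) (d : Int) (h : m < n) :
    (l.take n).getD m d = l.getD m d := by
  simp [List.getD_eq_getElem?_getD, h]

theorem getD_map_some (l : List Int) (i : Nat) (h : i < l.length) :
    (l.map (fun x => some x)).getD i none = some (l.getD i 0) := by
  simp [List.getD_eq_getElem?_getD, List.getElem?_map, List.getElem?_eq_getElem h]

theorem getD_append_left {α : Type} (l1 l2 : List α) (i : Nat) (d : α) (h : i < l1.length) :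
    (l1 ++ l2).getD i d = l1.getD i d := by
  simp [List.getD_eq_getElem?_getD, List.getElem?_append_left h]

theorem filterMap_id_map_some (w : List Int) : (w.map (fun x => some x)).filterMap id = w := by
  simp

theorem main_even (L : List Int) (m : Nat) (h : L.length = 2 * m) :
    hilbertizer L = hilbertizer_alt L := by
  rcases Nat.eq_zero_or_pos m with rfl | hm
  · have : L = [] := List.eq_nil_of_length_eq_zero (by omega)
    subst this
    rfl
  · unfold hilbertizer
    dsimp only
    rw [if_neg (by simp [h])]
    rw [loop_ilv m (L.map (fun x => some x)) (by simp [h])]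
    rw [← List.map_take, ← List.map_drop]
    rw [gg_closed none m _ (by simp [List.length_take, h]; omega),
        gg_closed none m _ (by simp [List.length_drop, h]; omega)]
    have e1 : (sIdx m).map (fun i => ((L.take m).map (fun x => some x)).getD i none)
        = ((sIdx m).map (fun i => L.getD i 0)).map (fun x => some x) := by
      rw [List.map_map]
      apply List.map_congr_left
      intro i hi
      have hil : i < m := s_lt hi
      simp only [Function.comp]
      rw [getD_map_some _ _ (by simp [List.length_take, h]; omega), getD_take _ _ _ _ hil]
    have e2 : (sIdx m).map (fun i => ((L.drop m).map (fun x => some x)).getD i none)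
        = ((sIdx m).map (fun i => L.getD (m + i) 0)).map (fun x => some x) := by
      rw [List.map_map]
      apply List.map_congr_left
      intro i hi
      have hil : i < m := s_lt hi
      simp only [Function.comp]
      rw [getD_map_some _ _ (by simp [List.length_drop, h]; omega), getD_drop]
    rw [e1, e2, ilv_map, ilv_flatMap, filterMap_id_map_some]
    unfold hilbertizer_alt
    dsimp only
    rw [h, show (2 * m + 1) / 2 = m from by omega, if_neg (by omega)]
    rw [List.filter_eq_self.mpr (by
      intro a ha
      simp only [List.mem_flatMap, List.mem_cons, List.not_mem_nil, or_false] at ha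
      obtain ⟨i, hi, hai⟩ := ha
      have := s_lt hi
      simp only [decide_eq_true_eq]
      omega)]
    rw [List.map_flatMap]
    apply flatMap_congr_mem
    intro i hi
    simp only [List.map_cons, List.map_nil]
    rw [Nat.add_comm m i]

theorem main_odd (L : List Int) (j : Nat) (h : L.length = 2 * j + 1) :
    hilbertizer L = hilbertizer_alt L := by
  unfold hilbertizer
  dsimp only
  rw [if_pos (by simp [h])]
  rw [loop_ilv (j + 1) (L.map (fun x => some x) ++ [none]) (by simp [h]; omega)]
  rw [List.take_append_of_le_length (by simp [h]; omega),
      List.drop_append_of_le_length (by simp [h]; omega)]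
  rw [← List.map_take, ← List.map_drop]
  rw [gg_closed none (j + 1) _ (by simp [List.length_take, h]; omega),
      gg_closed none (j + 1) _ (by
        simp only [List.length_append, List.length_map, List.length_drop, h,
          List.length_cons, List.length_nil]
        omega)]
  rw [s_split (j + 1) (by omega), show j + 1 - 1 = j from by omega]
  rw [List.map_append, List.map_append]
  have e1 : (tIdx (j + 1)).map (fun i => ((L.take (j + 1)).map (fun x => some x)).getD i none)
      = ((tIdx (j + 1)).map (fun i => L.getD i 0)).map (fun x => some x) := by
    rw [List.map_map]
    apply List.map_congr_left
    intro i hi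
    have hil : i < j := t_lt (by omega) hi
    simp only [Function.comp]
    rw [getD_map_some _ _ (by simp [List.length_take, h]; omega), getD_take _ _ _ _ (by omega)]
  have e2 : (tIdx (j + 1)).map
        (fun i => ((L.drop (j + 1)).map (fun x => some x) ++ [none]).getD i none)
      = ((tIdx (j + 1)).map (fun i => L.getD (j + 1 + i) 0)).map (fun x => some x) := by
    rw [List.map_map]
    apply List.map_congr_left
    intro i hi
    have hil : i < j := t_lt (by omega) hi
    simp only [Function.comp]
    rw [getD_append_left _ _ _ _ (by simp [List.length_map, List.length_drop, h]; omega),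
      getD_map_some _ _ (by simp [List.length_drop, h]; omega), getD_drop]
  have e3 : ([j].map (fun i => ((L.take (j + 1)).map (fun x => some x)).getD i none))
      = [some (L.getD j 0)] := by
    simp only [List.map_cons, List.map_nil]
    rw [getD_map_some _ _ (by simp [List.length_take, h]; omega), getD_take _ _ _ _ (by omega)]
  have e4 : ([j].map (fun i => ((L.drop (j + 1)).map (fun x => some x) ++ [none]).getD i none))
      = [none] := by
    simp only [List.map_cons, List.map_nil]
    have hlen : ((L.drop (j + 1)).map (fun x => some x)).length = j := by
      simp [List.length_map, List.length_drop, h]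
      omega
    rw [List.getD_eq_getElem?_getD, List.getElem?_append_right (by rw [hlen]), hlen]
    simp
  rw [e1, e2, e3, e4]
  rw [ilv_append_pair _ _ _ _ (by simp)]
  rw [show ilv ((((tIdx (j + 1)).map (fun i => L.getD i 0)).map (fun x => some x)))
        ((((tIdx (j + 1)).map (fun i => L.getD (j + 1 + i) 0)).map (fun x => some x)))
        ++ [some (L.getD j 0), none]
      = (ilv ((((tIdx (j + 1)).map (fun i => L.getD i 0)).map (fun x => some x)))
        ((((tIdx (j + 1)).map (fun i => L.getD (j + 1 + i) 0)).map (fun x => some x)))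
        ++ [some (L.getD j 0)]) ++ [none] from by simp]
  rw [List.dropLast_concat]
  rw [ilv_map, ilv_flatMap, List.filterMap_append, filterMap_id_map_some]
  have e5 : List.filterMap id [some (L.getD j 0)] = [L.getD j 0] := rfl
  rw [e5]
  -- right-hand side
  unfold hilbertizer_alt
  dsimp only
  rw [h, show (2 * j + 1 + 1) / 2 = j + 1 from by omega, if_neg (by omega)]
  rw [s_split (j + 1) (by omega), show j + 1 - 1 = j from by omega]
  rw [List.flatMap_append, List.filter_append]
  rw [List.filter_eq_self.mpr (by
    intro a ha
    simp only [List.mem_flatMap, List.mem_cons, List.not_mem_nil, or_false] at ha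
    obtain ⟨i, hi, hai⟩ := ha
    have := t_lt (m := j + 1) (by omega) hi
    simp only [decide_eq_true_eq]
    omega)]
  have e6 : List.filter (fun i => decide (i < 2 * j + 1))
      ([j].flatMap (fun i => [i, i + (j + 1)])) = [j] := by
    simp only [List.flatMap_cons, List.flatMap_nil, List.append_nil, List.filter_cons,
      List.filter_nil, decide_eq_true_eq]
    rw [if_pos (by omega), if_neg (by omega)]
  rw [e6, List.map_append, List.map_flatMap]
  simp only [List.map_cons, List.map_nil]
  congr 1
  apply flatMap_congr_mem
  intro i _
  rw [Nat.add_comm (j + 1) i]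

-- ===== VERDICT (by name: the statement is the Claim_ definition above) =====
theorem hilbertizer_spec : Claim_equal_hilbertizer := by
  intro L _
  unfold Spec_hilbertizer
  rcases Nat.even_or_odd L.length with ⟨m, hm⟩ | ⟨m, hm⟩
  · exact main_even L m (by omega)
  · exact main_odd L m (by omega)
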